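-- pv_equiv track=rewrite | github.com/kirbisak/Python-programming | stredna_skola/learning.py | ternary_numbers
-- ===== SOURCE A (Python) =====
-- def ternary_to_decimal(number: str):
--    result = 0
--    index = len(number) - 1
--    for element in number:
--       result += int(element) * (3 ** index)
--       index -= 1
--    return result
--
-- def ternary_numbers(result, number: str, length: int, total: int):
--    if length == 0 and total == 0:
--       result.append((ternary_to_decimal(number)))
--       return result
--
--    if length == 0:
--       return result
--
--    if number == '':
--       ternary_numbers(result, '2' + number, length - 1, total - 2)
--       ternary_numbers(result, '1' + number, length - 1, total - 1)
--    else: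
--       ternary_numbers(result, number + '2', length - 1, total - 2)
--       ternary_numbers(result, number + '1', length - 1, total - 1)
--       ternary_numbers(result, number + '0', length - 1, total - 0)
--    return result
-- ===== SOURCE B (Python) =====
-- # Output-sensitive pruned DFS: carries the decimal value incrementally instead of
-- # building ternary strings, and skips branches whose remaining digit budget cannot
-- # reach the required sum. Same in-place append to `result`; same return value.
--
-- def _value(number):
--     v = 0
--     for ch in number:
--         v = v * 3 + int(ch)
--     return v
--
-- def _dfs(result, v, rem, t):
--     if rem == 0:
--         result.append(v)
--         return
--     if 0 <= t - 2 <= 2 * (rem - 1):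
--         _dfs(result, v * 3 + 2, rem - 1, t - 2)
--     if 0 <= t - 1 <= 2 * (rem - 1):
--         _dfs(result, v * 3 + 1, rem - 1, t - 1)
--     if 0 <= t <= 2 * (rem - 1):
--         _dfs(result, v * 3, rem - 1, t)
--
-- def ternary_numbers(result, number, length, total):
--     if length == 0:
--         if total == 0:
--             result.append(_value(number))
--         return result
--     if length >= 1:
--         if 0 <= total - 2 <= 2 * (length - 1):
--             _dfs(result, _value(number) * 3 + 2, length - 1, total - 2)
--         if 0 <= total - 1 <= 2 * (length - 1):
--             _dfs(result, _value(number) * 3 + 1, length - 1, total - 1)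
--         if number != '' and 0 <= total <= 2 * (length - 1):
--             _dfs(result, _value(number) * 3, length - 1, total)
--     return result
-- ===== Notes on version B (the rewrite author's own statement) =====
-- stated objective: alternative
-- what changed: B prunes branches whose remaining digit budget cannot reach the required sum (0 <= t <= 2*rem) and carries the decimal value incrementally as v*3+d, instead of A's unpruned DFS that always walks all 3^length strings and reconverts each leaf with a power loop.
import Mathlib
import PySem

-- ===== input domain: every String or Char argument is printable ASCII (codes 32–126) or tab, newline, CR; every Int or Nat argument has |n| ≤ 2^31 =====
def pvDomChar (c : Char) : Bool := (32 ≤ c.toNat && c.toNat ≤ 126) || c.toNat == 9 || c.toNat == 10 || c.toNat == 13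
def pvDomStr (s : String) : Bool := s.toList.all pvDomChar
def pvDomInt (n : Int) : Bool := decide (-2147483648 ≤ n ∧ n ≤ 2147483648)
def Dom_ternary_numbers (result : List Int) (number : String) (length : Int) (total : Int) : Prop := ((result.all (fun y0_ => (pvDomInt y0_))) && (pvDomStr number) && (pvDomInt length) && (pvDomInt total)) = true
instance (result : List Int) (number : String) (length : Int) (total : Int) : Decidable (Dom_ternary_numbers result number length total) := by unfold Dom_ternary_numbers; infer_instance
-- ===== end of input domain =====

-- B replaces A's unpruned string-building DFS by a pruned DFS that carries the decimal
-- value incrementally (same in-place append to `result`; equivalence is about the return value).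


-- ===== PORT A =====
-- int(element) for the single character; none = ValueError, excluded by Pre_ (digits only)
def pvDigit (c : Char) : Int := (PySem.Int.ofStr? (String.ofList [c])).getD 0

-- loop of ternary_to_decimal: result += int(element) * 3**index; index -= 1
-- (index stays ≥ 0 while the loop runs — it starts at len-1 — so `.toNat` is exact here)
def pvTTD_go (cs : List Char) (result : Int) (index : Int) : Int :=
  match cs with
  | [] => result
  | c :: rest => pvTTD_go rest (result + pvDigit c * 3 ^ index.toNat) (index - 1)

def ternary_to_decimal (number : String) : Int :=
  pvTTD_go number.toList 0 (PySem.Str.len number - 1)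

-- the recursion of A, with fuel = length.toNat (for length < 0 the Python recurses
-- forever — RecursionError — and is excluded by Pre_; for length ≥ 0 this is exact)
def pvTN_go (fuel : Nat) (result : List Int) (number : String) (total : Int) : List Int :=
  match fuel with
  | 0 => if total = 0 then result ++ [ternary_to_decimal number] else result
  | n + 1 =>
    if number == "" then
      let r1 := pvTN_go n result ("2" ++ number) (total - 2)
      pvTN_go n r1 ("1" ++ number) (total - 1)
    else
      let r1 := pvTN_go n result (number ++ "2") (total - 2)
      let r2 := pvTN_go n r1 (number ++ "1") (total - 1)
      pvTN_go n r2 (number ++ "0") (total - 0)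

def ternary_numbers (result : List Int) (number : String) (length : Int) (total : Int) : List Int :=
  pvTN_go length.toNat result number total

-- ===== PORT B =====
-- v = v * 3 + int(ch) over the characters of number
def pvBVal (cs : List Char) (v : Int) : Int :=
  match cs with
  | [] => v
  | c :: rest => pvBVal rest (v * 3 + pvDigit c)

-- _dfs of Source B; rem as the Nat it is (it is length-1 ≥ 0 at the top call and decreases to 0)
def pvBDfs : Nat → Int → Int → List Int → List Int
  | 0, v, _, acc => acc ++ [v]
  | r + 1, v, t, acc =>
    let a2 := if 0 ≤ t - 2 ∧ t - 2 ≤ 2 * (r : Int) then pvBDfs r (v * 3 + 2) (t - 2) acc else acc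
    let a1 := if 0 ≤ t - 1 ∧ t - 1 ≤ 2 * (r : Int) then pvBDfs r (v * 3 + 1) (t - 1) a2 else a2
    if 0 ≤ t ∧ t ≤ 2 * (r : Int) then pvBDfs r (v * 3) t a1 else a1

def ternary_numbers_alt (result : List Int) (number : String) (length : Int) (total : Int) : List Int :=
  if length = 0 then
    if total = 0 then result ++ [pvBVal number.toList 0] else result
  else if 1 ≤ length then
    let a2 := if 0 ≤ total - 2 ∧ total - 2 ≤ 2 * (length - 1) then pvBDfs (length - 1).toNat (pvBVal number.toList 0 * 3 + 2) (total - 2) result else result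
    let a1 := if 0 ≤ total - 1 ∧ total - 1 ≤ 2 * (length - 1) then pvBDfs (length - 1).toNat (pvBVal number.toList 0 * 3 + 1) (total - 1) a2 else a2
    if number ≠ "" ∧ 0 ≤ total ∧ total ≤ 2 * (length - 1) then pvBDfs (length - 1).toNat (pvBVal number.toList 0 * 3) total a1 else a1
  else result

-- ===== PRECONDITION & SPEC =====
-- Pre_ excludes exactly the inputs where Python A raises: length < 0 (unbounded recursion,
-- RecursionError) and a non-digit character in number when some leaf is reachable (int(element)
-- raises ValueError at the first appended leaf; B raises ValueError on those same inputs).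
def Pre_ternary_numbers (result : List Int) (number : String) (length : Int) (total : Int) : Prop :=
  0 ≤ length ∧
    (number.toList.all (fun c => c.isDigit) = true ∨
      ¬ ((length = 0 ∧ total = 0) ∨
          (1 ≤ length ∧
            ((0 ≤ total - 2 ∧ total - 2 ≤ 2 * (length - 1)) ∨
             (0 ≤ total - 1 ∧ total - 1 ≤ 2 * (length - 1)) ∨
             (¬ number = "" ∧ 0 ≤ total ∧ total ≤ 2 * (length - 1))))))
instance (result : List Int) (number : String) (length : Int) (total : Int) : Decidable (Pre_ternary_numbers result number length total) := by unfold Pre_ternary_numbers; infer_instance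

def pvWitness_ternary_numbers : List Int × String × Int × Int := ([], "", 3, 4)

def Spec_ternary_numbers (result : List Int) (number : String) (length : Int) (total : Int) (out : List Int) : Prop := out = ternary_numbers_alt result number length total
instance (result : List Int) (number : String) (length : Int) (total : Int) (out : List Int) : Decidable (Spec_ternary_numbers result number length total out) := by unfold Spec_ternary_numbers; infer_instance

-- ===== CLAIM (what is proved, stated in full; the proofs are below) =====
def Claim_equal_ternary_numbers : Prop := ∀ (result : List Int) (number : String) (length : Int) (total : Int), Dom_ternary_numbers result number length total → Pre_ternary_numbers result number length total → Spec_ternary_numbers result number length total (ternary_numbers result number length total)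

-- ===== LEMMAS AND PROOFS =====

-- Horner shift: starting value scales by 3^len
theorem pvBVal_shift (cs : List Char) (v : Int) :
    pvBVal cs v = v * 3 ^ cs.length + pvBVal cs 0 := by
  induction cs generalizing v with
  | nil => simp [pvBVal]
  | cons c rest ih =>
    rw [pvBVal, pvBVal, ih (v * 3 + pvDigit c), ih (0 * 3 + pvDigit c)]
    simp [List.length_cons, pow_succ]; ring

theorem pvBVal_append (l1 l2 : List Char) (v : Int) :
    pvBVal (l1 ++ l2) v = pvBVal l2 (pvBVal l1 v) := by
  induction l1 generalizing v with
  | nil => simp [pvBVal]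
  | cons c rest ih => simp [pvBVal, ih]

-- A's power-based conversion equals B's Horner fold
theorem pvTTD_eq_horner (cs : List Char) (r : Int) :
    pvTTD_go cs r ((cs.length : Int) - 1) = r + pvBVal cs 0 := by
  induction cs generalizing r with
  | nil => simp [pvTTD_go, pvBVal]
  | cons c rest ih =>
    rw [pvTTD_go]
    have h1 : (((c :: rest).length : Int) - 1).toNat = rest.length := by
      simp only [List.length_cons]; omega
    have h2 : ((c :: rest).length : Int) - 1 - 1 = (rest.length : Int) - 1 := by
      simp only [List.length_cons]; push_cast; ring
    rw [h1, h2, ih, pvBVal, pvBVal_shift rest (0 * 3 + pvDigit c)]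
    ring

theorem ttd_eq_val (s : String) : ternary_to_decimal s = pvBVal s.toList 0 := by
  rw [ternary_to_decimal, PySem.Str.len_eq]
  have := pvTTD_eq_horner s.toList 0
  omega

theorem append_char_ne_empty (s : String) (c : Char) : ¬ (s ++ String.ofList [c] = "") := by
  intro h
  have : (s ++ String.ofList [c]).toList = ("" : String).toList := by rw [h]
  simp at this

theorem pvDigit_two : pvDigit '2' = 2 := by decide
theorem pvDigit_one : pvDigit '1' = 1 := by decide
theorem pvDigit_zero : pvDigit '0' = 0 := by decide

theorem val_append_digit (s : String) (c : Char) :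
    pvBVal (s ++ String.ofList [c]).toList 0 = pvBVal s.toList 0 * 3 + pvDigit c := by
  rw [String.toList_append, pvBVal_append]
  simp [pvBVal]

-- main invariant: A's recursion on a nonempty prefix s equals B's pruned DFS on its value
theorem pvMain (n : Nat) (s : String) (v t : Int) (acc : List Int)
    (hne : ¬ s = "") (hv : pvBVal s.toList 0 = v) :
    pvTN_go n acc s t = if 0 ≤ t ∧ t ≤ 2 * (n : Int) then pvBDfs n v t acc else acc := by
  induction n generalizing s v t acc with
  | zero =>
    rw [pvTN_go]
    rcases eq_or_ne t 0 with h | h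
    · subst h
      rw [if_pos rfl, if_pos (by norm_num)]
      simp [pvBDfs, ttd_eq_val, hv]
    · rw [if_neg h, if_neg (by push_cast; omega)]
  | succ n ih =>
    rw [pvTN_go]
    have hbeq : (s == "") = false := by simp [hne]
    rw [hbeq]
    simp only [Bool.false_eq_true, if_false]
    have hA2 := ih (s ++ "2") (v * 3 + 2) (t - 2) acc (append_char_ne_empty s '2')
      (by rw [show ("2" : String) = String.ofList ['2'] from rfl, val_append_digit, hv, pvDigit_two])
    have hA1 := ih (s ++ "1") (v * 3 + 1) (t - 1)
      (if 0 ≤ t - 2 ∧ t - 2 ≤ 2 * (n : Int) then pvBDfs n (v * 3 + 2) (t - 2) acc else acc)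
      (append_char_ne_empty s '1')
      (by rw [show ("1" : String) = String.ofList ['1'] from rfl, val_append_digit, hv, pvDigit_one])
    have hA0 := ih (s ++ "0") (v * 3 + 0) (t - 0)
      (if 0 ≤ t - 1 ∧ t - 1 ≤ 2 * (n : Int) then pvBDfs n (v * 3 + 1) (t - 1)
        (if 0 ≤ t - 2 ∧ t - 2 ≤ 2 * (n : Int) then pvBDfs n (v * 3 + 2) (t - 2) acc else acc)
       else (if 0 ≤ t - 2 ∧ t - 2 ≤ 2 * (n : Int) then pvBDfs n (v * 3 + 2) (t - 2) acc else acc))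
      (append_char_ne_empty s '0')
      (by rw [show ("0" : String) = String.ofList ['0'] from rfl, val_append_digit, hv, pvDigit_zero])
    rw [hA2, hA1, hA0]
    rcases Classical.em (0 ≤ t ∧ t ≤ 2 * ((n + 1 : Nat) : Int)) with hc | hc
    · rw [if_pos hc, pvBDfs]
      norm_num
    · rw [if_neg hc]
      have hx : ¬ (0 ≤ t ∧ t ≤ 2 * (n : Int) + 2) := by push_cast at hc; omega
      rw [if_neg (show ¬ (0 ≤ t - 2 ∧ t - 2 ≤ 2 * (n : Int)) by omega),
          if_neg (show ¬ (0 ≤ t - 1 ∧ t - 1 ≤ 2 * (n : Int)) by omega),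
          if_neg (show ¬ (0 ≤ t - 0 ∧ t - 0 ≤ 2 * (n : Int)) by omega)]

-- ===== VERDICT (by name: the statement is the Claim_ definition above) =====
theorem ternary_numbers_spec : Claim_equal_ternary_numbers := by
  intro result number length total _hDom hPre
  obtain ⟨hlen, _hdig⟩ := hPre
  unfold Spec_ternary_numbers ternary_numbers ternary_numbers_alt
  rcases eq_or_ne length 0 with h0 | h0
  · subst h0
    simp only [Int.toNat_zero, pvTN_go]
    rw [ttd_eq_val]
    norm_num
  · have h1 : 1 ≤ length := by omega
    have hn : length.toNat = (length - 1).toNat + 1 := by omega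
    have hcast : ((length - 1).toNat : Int) = length - 1 := by omega
    rw [hn, if_neg h0, if_pos h1]
    rcases eq_or_ne number "" with he | he
    · subst he
      have hv0 : pvBVal ("" : String).toList 0 = 0 := rfl
      rw [pvTN_go]
      simp only [beq_self_eq_true, if_true]
      have hA2 := pvMain (length - 1).toNat ("2" ++ "") (0 * 3 + 2) (total - 2) result
        (by decide) (by decide)
      have hA1 := pvMain (length - 1).toNat ("1" ++ "") (0 * 3 + 1) (total - 1)
        (if 0 ≤ total - 2 ∧ total - 2 ≤ 2 * ((length - 1).toNat : Int) then pvBDfs (length - 1).toNat (0 * 3 + 2) (total - 2) result else result)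
        (by decide) (by decide)
      rw [hcast] at hA2 hA1
      rw [hA2, hA1, hv0]
      have hg : ¬ (("" : String) ≠ "" ∧ 0 ≤ total ∧ total ≤ 2 * (length - 1)) := by
        intro h; exact h.1 rfl
      rw [if_neg hg]
    · have hA2 := pvMain (length - 1).toNat (number ++ "2") (pvBVal number.toList 0 * 3 + 2) (total - 2) result
        (append_char_ne_empty number '2')
        (by rw [show ("2" : String) = String.ofList ['2'] from rfl, val_append_digit, pvDigit_two])
      have hA1 := pvMain (length - 1).toNat (number ++ "1") (pvBVal number.toList 0 * 3 + 1) (total - 1)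
        (pvTN_go (length - 1).toNat result (number ++ "2") (total - 2))
        (append_char_ne_empty number '1')
        (by rw [show ("1" : String) = String.ofList ['1'] from rfl, val_append_digit, pvDigit_one])
      have hA0 := pvMain (length - 1).toNat (number ++ "0") (pvBVal number.toList 0 * 3 + 0) (total - 0)
        (pvTN_go (length - 1).toNat (pvTN_go (length - 1).toNat result (number ++ "2") (total - 2)) (number ++ "1") (total - 1))
        (append_char_ne_empty number '0')
        (by rw [show ("0" : String) = String.ofList ['0'] from rfl, val_append_digit, pvDigit_zero])
      rw [pvTN_go]
      have hbeq : (number == "") = false := by simp [he]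
      rw [hbeq]
      simp only [Bool.false_eq_true, if_false]
      rw [hcast] at hA2 hA1 hA0
      rw [hA0, hA1, hA2]
      have hg : (number ≠ "" ∧ 0 ≤ total ∧ total ≤ 2 * (length - 1)) ↔ (0 ≤ total - 0 ∧ total - 0 ≤ 2 * (length - 1)) := by
        constructor
        · rintro ⟨_, h⟩; omega
        · intro h; exact ⟨he, by omega⟩
      by_cases hc : 0 ≤ total - 0 ∧ total - 0 ≤ 2 * (length - 1)
      · rw [if_pos hc, if_pos (hg.mpr hc)]
        norm_num
      · rw [if_neg hc, if_neg (fun h => hc (hg.mp h))]
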